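-- pv_equiv track=rewrite | github.com/EffePen/advent-of-code | 2018/day_08/solver.py | store_node_info
-- ===== SOURCE A (Python) =====
-- def store_node_info(code, start_idx, nodes_dict):
--     num_child_nodes = code[start_idx]
--     num_metadata = code[start_idx+1]
--
--     # Iterate recursively over children nodes, so that their info is filled before moving forward
--     children_idxs = []
--     end_idx = start_idx + 2
--     for idx in range(num_child_nodes):
--         children_idxs.append(end_idx)
--         end_idx = store_node_info(code, end_idx, nodes_dict)
--
--     metadata = code[end_idx:end_idx+num_metadata]
--
--     if num_child_nodes == 0:
--         # If it has no children nodes, get score from its metadata entries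
--         score = sum(metadata)
--     else:
--         # If it has children nodes, calculate score starting from their scores
--         # (this is assured by the previous iteration)
--         children_refs = [r for r in metadata if 0 < r <= num_child_nodes]
--         score = sum([nodes_dict[children_idxs[r-1]][2] for r in children_refs])
--
--     # Store the node info
--     nodes_dict[start_idx] = (children_idxs, metadata, score)
--     return end_idx+num_metadata
-- ===== SOURCE B (Python) =====
-- def store_node_info(code, start_idx, nodes_dict):
--     # Iterative explicit-stack parse (pass 1) + post-order score replay (pass 2).
--     # Frames: (start, num_children, num_metadata, children_idxs)
--     stack = [(start_idx, code[start_idx], code[start_idx + 1], [])]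
--     completed = []
--     i = start_idx + 2
--     while stack:
--         start, nc, nm, cs = stack[-1]
--         if len(cs) < nc:
--             cs.append(i)
--             stack.append((i, code[i], code[i + 1], []))
--             i += 2
--         else:
--             stack.pop()
--             metadata = code[i:i + nm]
--             completed.append((start, cs, metadata, nc))
--             i += nm
--     scores = {}
--     for start, cs, metadata, nc in completed:
--         if nc == 0:
--             s = sum(metadata)
--         else:
--             s = sum(scores[cs[r - 1]] for r in metadata if 0 < r <= nc)
--         scores[start] = s
--         nodes_dict[start] = (cs, metadata, s)
--     return i
-- ===== Notes on version B (the rewrite author's own statement) =====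
-- stated objective: alternative
-- what changed: Replaces A's recursive descent (which computes each node's score inside the recursion via dict lookups) with an explicit-stack iterative single-pass parse that records nodes in completion order, followed by a linear post-order replay that computes scores and writes nodes_dict; same return value and same nodes_dict mutation on every input A returns on.
import Mathlib
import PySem

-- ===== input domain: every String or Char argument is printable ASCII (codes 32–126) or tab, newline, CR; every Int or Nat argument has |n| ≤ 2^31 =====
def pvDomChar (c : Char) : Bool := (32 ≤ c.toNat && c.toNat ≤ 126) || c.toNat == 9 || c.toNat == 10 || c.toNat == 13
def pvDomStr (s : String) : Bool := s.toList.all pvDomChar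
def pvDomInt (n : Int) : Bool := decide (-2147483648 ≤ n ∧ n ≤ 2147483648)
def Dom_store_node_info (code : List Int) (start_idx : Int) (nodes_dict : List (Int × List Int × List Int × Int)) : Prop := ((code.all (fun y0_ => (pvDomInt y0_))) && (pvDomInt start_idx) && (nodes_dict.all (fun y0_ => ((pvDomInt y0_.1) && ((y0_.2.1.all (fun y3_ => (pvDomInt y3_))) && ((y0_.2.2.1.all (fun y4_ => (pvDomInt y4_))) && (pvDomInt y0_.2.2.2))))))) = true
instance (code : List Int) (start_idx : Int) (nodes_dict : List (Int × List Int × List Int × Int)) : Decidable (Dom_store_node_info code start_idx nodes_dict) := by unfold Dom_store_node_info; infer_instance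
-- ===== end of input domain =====

-- B replaces A's recursive descent (scores computed inside the recursion via the dict) by an
-- explicit-stack one-pass parse followed by a post-order score replay; equivalence is claimed
-- for the RETURN VALUE only (both programs also mutate nodes_dict, and B performs the same
-- mutation on every input A returns on, but the Int-returning signature drops it).

-- ===== PORT A =====
-- recursion guarded by fuel; on every input admitted by Pre_ the fuel is sufficient
-- (a returning run's recursion depth is at most the number of valid wrapped indices).
def parseA (code : List Int) : Nat → Int → PySem.Dict Int (List Int × List Int × Int) →
    Option (Int × PySem.Dict Int (List Int × List Int × Int))
  | 0, _, _ => none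
  | f+1, start, d =>
    match PySem.List.pyGet? code start, PySem.List.pyGet? code (start+1) with
    | some nc, some nm =>
      -- for idx in range(num_child_nodes): children_idxs.append(end_idx); end_idx = recurse
      match (PySem.List.pyRange 0 nc 1).foldl
          (fun acc _ => acc.bind (fun st =>
            (parseA code f st.2.1 st.2.2).map (fun r => (st.1 ++ [st.2.1], r.1, r.2))))
          (some (([] : List Int), start + 2, d)) with
      | some (cs, e, d') =>
        let metadata := PySem.List.slice code (some e) (some (e + nm))
        -- nodes_dict[children_idxs[r-1]] and cs[r-1] always hit (every child stored itself),
        -- so the getD defaults below are never used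
        let score : Int :=
          if nc = 0 then metadata.sum
          else ((metadata.filter (fun r => decide (0 < r) && decide (r ≤ nc))).map
                 (fun r => (d'.getD (PySem.List.pyGetD cs (r-1) 0) ([], [], 0)).2.2)).sum
        some (e + nm, d'.insert start (cs, metadata, score))
      | none => none
    | _, _ => none

def store_node_info (code : List Int) (start_idx : Int) (nodes_dict : List (Int × List Int × List Int × Int)) : Int :=
  match parseA code (2 * code.length + 2) start_idx (PySem.Dict.ofList nodes_dict) with
  | some (e, _) => e
  | none => 0

-- ===== PORT B =====
-- fuel oracle for the while-loop: skelSteps returns (end index, number of loop iterations - 1);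
-- it only provides a sufficient fuel, the computation itself is the stack machine runB.
def skelSteps (code : List Int) : Nat → Int → Option (Int × Nat)
  | 0, _ => none
  | f+1, s =>
    match PySem.List.pyGet? code s, PySem.List.pyGet? code (s+1) with
    | some nc, some nm =>
      match (PySem.List.pyRange 0 nc 1).foldl
          (fun acc _ => acc.bind (fun p =>
            (skelSteps code f p.1).map (fun q => (q.1, p.2 + 1 + q.2))))
          (some (s + 2, (0 : Nat))) with
      | some (e, t) => some (e + nm, t + 1)
      | none => none
    | _, _ => none

-- the while loop: each iteration either pushes a fresh frame or closes the top frame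
def runB (code : List Int) : Nat → List (Int × Int × Int × List Int) → Int →
    List (Int × List Int × List Int × Int) → Option (Int × List (Int × List Int × List Int × Int))
  | 0, _, _, _ => none
  | f+1, stack, i, completed =>
    match stack with
    | [] => some (i, completed)
    | (s, nc, nm, cs) :: rest =>
      if (cs.length : Int) < nc then
        match PySem.List.pyGet? code i, PySem.List.pyGet? code (i+1) with
        | some c1, some c2 =>
          runB code f ((i, c1, c2, ([] : List Int)) :: (s, nc, nm, cs ++ [i]) :: rest) (i+2) completed
        | _, _ => none
      else
        runB code f rest (i + nm)
          (completed ++ [(s, cs, PySem.List.slice code (some i) (some (i + nm)), nc)])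

-- pass 2: score replay in completion order (children complete before their parent)
def scorePass (completed : List (Int × List Int × List Int × Int))
    (scores : PySem.Dict Int Int) (nodes : PySem.Dict Int (List Int × List Int × Int)) :
    PySem.Dict Int (List Int × List Int × Int) :=
  match completed with
  | [] => nodes
  | (s, cs, md, nc) :: rest =>
    let sc : Int :=
      if nc = 0 then md.sum
      else ((md.filter (fun r => decide (0 < r) && decide (r ≤ nc))).map
             (fun r => scores.getD (PySem.List.pyGetD cs (r-1) 0) 0)).sum
    scorePass rest (scores.insert s sc) (nodes.insert s (cs, md, sc))

def store_node_info_alt (code : List Int) (start_idx : Int) (nodes_dict : List (Int × List Int × List Int × Int)) : Int :=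
  match PySem.List.pyGet? code start_idx, PySem.List.pyGet? code (start_idx + 1) with
  | some nc0, some nm0 =>
    let fuel : Nat :=
      match skelSteps code (2 * code.length + 2) start_idx with
      | some (_, t) => t + 1
      | none => 1
    match runB code fuel [(start_idx, nc0, nm0, ([] : List Int))] (start_idx + 2) [] with
    | some (i, completed) =>
      -- second pass builds the updated nodes_dict; the Int-returning signature drops it
      let _nodes := scorePass completed PySem.Dict.empty (PySem.Dict.ofList nodes_dict)
      i
    | none => 0
  | _, _ => 0

-- ===== PRECONDITION & SPEC =====
-- Pre_: the code encodes one complete well-formed day-8 licence node at start_idx — the grammar: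
-- two readable header entries, that many well-formed children in sequence, then the metadata
-- slice.  This is the description of the inputs on which A returns instead of raising IndexError
-- (grammar membership of a parsed input is inherently recursive, like balanced parentheses;
-- wfNode checks only the input's shape, computes no scores/children/dict, and is independent of
-- both ports; the fuel 2*len+2 bounds nesting depth, which never exceeds the number of valid
-- wrapped indices; A can also hit Python's recursion-depth limit on very deep inputs).
def wfNode (code : List Int) : Nat → Int → Option Int
  | 0, _ => none
  | f+1, s =>
    match PySem.List.pyGet? code s, PySem.List.pyGet? code (s+1) with
    | some nc, some nm =>
      match (PySem.List.pyRange 0 nc 1).foldl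
          (fun acc _ => acc.bind (wfNode code f)) (some (s + 2)) with
      | some e => some (e + nm)
      | none => none
    | _, _ => none

def Pre_store_node_info (code : List Int) (start_idx : Int) (_nodes_dict : List (Int × List Int × List Int × Int)) : Prop :=
  (wfNode code (2 * code.length + 2) start_idx).isSome = true

instance (code : List Int) (start_idx : Int) (nodes_dict : List (Int × List Int × List Int × Int)) : Decidable (Pre_store_node_info code start_idx nodes_dict) := by
  unfold Pre_store_node_info; infer_instance

def pvWitness_store_node_info : List Int × Int × (List (Int × List Int × List Int × Int)) :=
  ([2, 3, 0, 3, 10, 11, 12, 1, 1, 0, 1, 99, 2, 1, 1, 2], 0, [])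

def Spec_store_node_info (code : List Int) (start_idx : Int) (nodes_dict : List (Int × List Int × List Int × Int)) (out : Int) : Prop := out = store_node_info_alt code start_idx nodes_dict
instance (code : List Int) (start_idx : Int) (nodes_dict : List (Int × List Int × List Int × Int)) (out : Int) : Decidable (Spec_store_node_info code start_idx nodes_dict out) := by unfold Spec_store_node_info; infer_instance

-- ===== CLAIM (what is proved, stated in full; the proofs are below) =====
def Claim_equal_store_node_info : Prop := ∀ (code : List Int) (start_idx : Int) (nodes_dict : List (Int × List Int × List Int × Int)), Dom_store_node_info code start_idx nodes_dict → Pre_store_node_info code start_idx nodes_dict → Spec_store_node_info code start_idx nodes_dict (store_node_info code start_idx nodes_dict)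

-- ===== LEMMAS AND PROOFS =====


-- generic relation between two Option-state folds over the same list
theorem pvFoldlRel {σ τ : Type} (g : σ → Option σ) (h : τ → Option τ) (m : σ → τ)
    (hg : ∀ s, (g s).map m = h (m s)) :
    ∀ (l : List Int) (st : Option σ),
      (l.foldl (fun acc _ => acc.bind g) st).map m =
        l.foldl (fun acc _ => acc.bind h) (st.map m) := by
  intro l
  induction l with
  | nil => intro st; rfl
  | cons x l ih =>
    intro st
    simp only [List.foldl]
    rw [ih]
    congr 1
    cases st with
    | none => rfl
    | some s => simp [hg s]

theorem parseA_fst (code : List Int) :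
    ∀ (f : Nat) (s : Int) (d : PySem.Dict Int (List Int × List Int × Int)),
      (parseA code f s d).map Prod.fst = wfNode code f s := by
  intro f
  induction f with
  | zero => intro s d; rfl
  | succ f ih =>
    intro s d
    simp only [parseA, wfNode]
    cases h1 : PySem.List.pyGet? code s with
    | none => rfl
    | some nc =>
      cases h2 : PySem.List.pyGet? code (s+1) with
      | none => rfl
      | some nm =>
        dsimp only
        have hrel := pvFoldlRel
          (fun st : List Int × Int × PySem.Dict Int (List Int × List Int × Int) =>
            (parseA code f st.2.1 st.2.2).map (fun r => (st.1 ++ [st.2.1], r.1, r.2)))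
          (wfNode code f) (fun st => st.2.1)
          (by
            intro st
            rw [Option.map_map]
            have : ((fun st' : List Int × Int × PySem.Dict Int (List Int × List Int × Int) => st'.2.1) ∘
                (fun r : Int × PySem.Dict Int (List Int × List Int × Int) => (st.1 ++ [st.2.1], r.1, r.2))) = Prod.fst := by
              funext r; rfl
            rw [this, ih])
          (PySem.List.pyRange 0 nc 1) (some ([], s + 2, d))
        simp only [Option.map_some] at hrel
        cases hfold : (PySem.List.pyRange 0 nc 1).foldl
            (fun acc _ => acc.bind (fun st : List Int × Int × PySem.Dict Int (List Int × List Int × Int) =>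
              (parseA code f st.2.1 st.2.2).map (fun r => (st.1 ++ [st.2.1], r.1, r.2))))
            (some ([], s + 2, d)) with
        | none =>
          rw [hfold] at hrel
          simp only [Option.map_none] at hrel
          rw [← hrel]
          rfl
        | some p =>
          obtain ⟨cs, e, d'⟩ := p
          rw [hfold] at hrel
          simp only [Option.map_some] at hrel
          rw [← hrel]
          rfl

theorem skelSteps_fst (code : List Int) :
    ∀ (f : Nat) (s : Int), (skelSteps code f s).map Prod.fst = wfNode code f s := by
  intro f
  induction f with
  | zero => intro s; rfl
  | succ f ih =>
    intro s
    simp only [skelSteps, wfNode]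
    cases h1 : PySem.List.pyGet? code s with
    | none => rfl
    | some nc =>
      cases h2 : PySem.List.pyGet? code (s+1) with
      | none => rfl
      | some nm =>
        dsimp only
        have hrel := pvFoldlRel
          (fun p : Int × Nat => (skelSteps code f p.1).map (fun q => (q.1, p.2 + 1 + q.2)))
          (wfNode code f) Prod.fst
          (by
            intro p
            rw [Option.map_map]
            have : (Prod.fst ∘ (fun q : Int × Nat => (q.1, p.2 + 1 + q.2))) = Prod.fst := by
              funext q; rfl
            rw [this, ih])
          (PySem.List.pyRange 0 nc 1) (some (s + 2, 0))
        simp only [Option.map_some] at hrel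
        cases hfold : (PySem.List.pyRange 0 nc 1).foldl
            (fun acc _ => acc.bind (fun p : Int × Nat =>
              (skelSteps code f p.1).map (fun q => (q.1, p.2 + 1 + q.2))))
            (some (s + 2, (0 : Nat))) with
        | none =>
          rw [hfold] at hrel
          simp only [Option.map_none] at hrel
          rw [← hrel]
          rfl
        | some p =>
          obtain ⟨e, t⟩ := p
          rw [hfold] at hrel
          simp only [Option.map_some] at hrel
          rw [← hrel]
          rfl


theorem pvFoldlNone {σ : Type} (g : σ → Option σ) :
    ∀ (l : List Int), l.foldl (fun acc _ => acc.bind g) none = none := by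
  intro l
  induction l with
  | nil => rfl
  | cons x l ih => simp only [List.foldl, Option.bind_none] at ih ⊢; exact ih

theorem skelSteps_headers (code : List Int) (f : Nat) (s e : Int) (t : Nat)
    (h : skelSteps code f s = some (e, t)) :
    ∃ nc nm, PySem.List.pyGet? code s = some nc ∧ PySem.List.pyGet? code (s+1) = some nm := by
  cases f with
  | zero => simp [skelSteps] at h
  | succ f =>
    simp only [skelSteps] at h
    cases h1 : PySem.List.pyGet? code s with
    | none => rw [h1] at h; simp at h
    | some nc =>
      cases h2 : PySem.List.pyGet? code (s+1) with
      | none => rw [h1, h2] at h; simp at h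
      | some nm => exact ⟨nc, nm, rfl, rfl⟩

theorem pvShift (code : List Int) (f : Nat) :
    ∀ (l : List Int) (i : Int) (a : Nat),
      l.foldl (fun acc _ => acc.bind (fun p : Int × Nat =>
          (skelSteps code f p.1).map (fun q => (q.1, p.2 + 1 + q.2)))) (some (i, a)) =
        (l.foldl (fun acc _ => acc.bind (fun p : Int × Nat =>
          (skelSteps code f p.1).map (fun q => (q.1, p.2 + 1 + q.2)))) (some (i, 0))).map
          (fun p => (p.1, a + p.2)) := by
  intro l
  induction l with
  | nil => intro i a; rfl
  | cons x l ih =>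
    intro i a
    simp only [List.foldl, Option.bind_some]
    cases hsk : skelSteps code f i with
    | none =>
      simp only [Option.map_none]
      rw [pvFoldlNone]
      rfl
    | some p =>
      obtain ⟨e1, t1⟩ := p
      simp only [Option.map_some]
      rw [ih e1 (a + 1 + t1), ih e1 (0 + 1 + t1), Option.map_map]
      cases hres : l.foldl (fun acc _ => acc.bind (fun p : Int × Nat =>
          (skelSteps code f p.1).map (fun q => (q.1, p.2 + 1 + q.2)))) (some (e1, 0)) with
      | none => rfl
      | some q =>
        obtain ⟨e2, t2⟩ := q
        simp only [Option.map_some, Function.comp]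
        congr 2
        omega

theorem chainSim (code : List Int) (f : Nat)
    (ih : ∀ (s e : Int) (t : Nat), skelSteps code f s = some (e, t) →
      ∀ (nc nm : Int), PySem.List.pyGet? code s = some nc →
        PySem.List.pyGet? code (s+1) = some nm →
      ∀ (rest : List (Int × Int × Int × List Int))
        (completed : List (Int × List Int × List Int × Int)) (fuel : Nat),
        ∃ Δ, runB code (fuel + t) ((s, nc, nm, ([] : List Int)) :: rest) (s+2) completed =
              runB code fuel rest e (completed ++ Δ)) :
    ∀ (l : List Int) (i e : Int) (t : Nat),
      l.foldl (fun acc _ => acc.bind (fun p : Int × Nat =>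
          (skelSteps code f p.1).map (fun q => (q.1, p.2 + 1 + q.2)))) (some (i, 0)) = some (e, t) →
      ∀ (s nc nm : Int) (cs : List Int) (rest : List (Int × Int × Int × List Int))
        (completed : List (Int × List Int × List Int × Int)) (fuel : Nat),
        cs.length + l.length = nc.toNat →
        ∃ Δ, runB code (fuel + t + 1) ((s, nc, nm, cs) :: rest) i completed =
              runB code fuel rest (e + nm) (completed ++ Δ) := by
  intro l
  induction l with
  | nil =>
    intro i e t hfold s nc nm cs rest completed fuel hlen
    simp only [List.foldl] at hfold
    obtain ⟨rfl, rfl⟩ : i = e ∧ 0 = t := by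
      have := hfold
      simp at this
      exact ⟨this.1, this.2⟩
    have hnlt : ¬ ((cs.length : Int) < nc) := by
      simp only [List.length_nil, Nat.add_zero] at hlen
      omega
    refine ⟨[(s, cs, PySem.List.slice code (some i) (some (i + nm)), nc)], ?_⟩
    show runB code (fuel + 0 + 1) _ _ _ = _
    simp only [runB]
    rw [if_neg hnlt]
  | cons x l ihl =>
    intro i e t hfold s nc nm cs rest completed fuel hlen
    simp only [List.foldl, Option.bind_some] at hfold
    cases hsk : skelSteps code f i with
    | none =>
      rw [hsk] at hfold
      simp only [Option.map_none] at hfold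
      rw [pvFoldlNone] at hfold
      simp at hfold
    | some p =>
      obtain ⟨e1, t1⟩ := p
      rw [hsk] at hfold
      simp only [Option.map_some] at hfold
      rw [pvShift code f l e1 (0 + 1 + t1)] at hfold
      cases hres : l.foldl (fun acc _ => acc.bind (fun p : Int × Nat =>
          (skelSteps code f p.1).map (fun q => (q.1, p.2 + 1 + q.2)))) (some (e1, 0)) with
      | none => rw [hres] at hfold; simp at hfold
      | some q =>
        obtain ⟨e2, t2⟩ := q
        rw [hres] at hfold
        simp only [Option.map_some, Option.some.injEq, Prod.mk.injEq] at hfold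
        obtain ⟨he, ht⟩ : e2 = e ∧ 0 + 1 + t1 + t2 = t := hfold
        subst he
        subst ht
        obtain ⟨c1, c2, hc1, hc2⟩ := skelSteps_headers code f i e1 t1 hsk
        have hlt : (cs.length : Int) < nc := by
          simp only [List.length_cons] at hlen
          omega
        have harith : fuel + (0 + 1 + t1 + t2) + 1 = (((fuel + t2 + 1) + t1) + 1) := by omega
        rw [harith]
        obtain ⟨Δ1, h1step⟩ :=
          ih i e1 t1 hsk c1 c2 hc1 hc2 ((s, nc, nm, cs ++ [i]) :: rest) completed (fuel + t2 + 1)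
        obtain ⟨Δ2, h2step⟩ :=
          ihl e1 e2 t2 hres s nc nm (cs ++ [i]) rest (completed ++ Δ1) fuel
            (by simp at hlen ⊢; omega)
        refine ⟨Δ1 ++ Δ2, ?_⟩
        show runB code ((fuel + t2 + 1 + t1) + 1) _ _ _ = _
        simp only [runB]
        rw [if_pos hlt, hc1, hc2]
        dsimp only
        rw [h1step, h2step]
        simp [List.append_assoc]

theorem nodeSim (code : List Int) :
    ∀ (f : Nat) (s e : Int) (t : Nat), skelSteps code f s = some (e, t) →
      ∀ (nc nm : Int), PySem.List.pyGet? code s = some nc →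
        PySem.List.pyGet? code (s+1) = some nm →
      ∀ (rest : List (Int × Int × Int × List Int))
        (completed : List (Int × List Int × List Int × Int)) (fuel : Nat),
        ∃ Δ, runB code (fuel + t) ((s, nc, nm, ([] : List Int)) :: rest) (s+2) completed =
              runB code fuel rest e (completed ++ Δ) := by
  intro f
  induction f with
  | zero => intro s e t h; simp [skelSteps] at h
  | succ f ihf =>
    intro s e t h nc nm hc1 hc2 rest completed fuel
    simp only [skelSteps] at h
    rw [hc1, hc2] at h
    dsimp only at h
    cases hfold : (PySem.List.pyRange 0 nc 1).foldl
        (fun acc _ => acc.bind (fun p : Int × Nat =>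
          (skelSteps code f p.1).map (fun q => (q.1, p.2 + 1 + q.2))))
        (some (s + 2, (0 : Nat))) with
    | none => rw [hfold] at h; simp at h
    | some p =>
      obtain ⟨ec, tc⟩ := p
      rw [hfold] at h
      simp only [Option.some.injEq, Prod.mk.injEq] at h
      obtain ⟨rfl, rfl⟩ : ec + nm = e ∧ tc + 1 = t := h
      have hlen : (0 : Nat) + (PySem.List.pyRange 0 nc 1).length = nc.toNat := by
        simp [PySem.List.length_pyRange_one]
      obtain ⟨Δ, hrun⟩ := chainSim code f ihf (PySem.List.pyRange 0 nc 1) (s+2) ec tc hfold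
        s nc nm [] rest completed fuel (by simp only [List.length_nil]; exact hlen)
      exact ⟨Δ, hrun⟩

-- ===== VERDICT (by name: the statement is the Claim_ definition above) =====
theorem store_node_info_spec : Claim_equal_store_node_info := by
  intro code start_idx nodes_dict _hdom hpre
  unfold Spec_store_node_info
  unfold Pre_store_node_info at hpre
  obtain ⟨e, hw⟩ := Option.isSome_iff_exists.mp hpre
  have hA := parseA_fst code (2*code.length+2) start_idx (PySem.Dict.ofList nodes_dict)
  rw [hw] at hA
  have hS := skelSteps_fst code (2*code.length+2) start_idx
  rw [hw] at hS
  cases hpA : parseA code (2*code.length+2) start_idx (PySem.Dict.ofList nodes_dict) with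
  | none => rw [hpA] at hA; simp at hA
  | some pr =>
    obtain ⟨eA, dA⟩ := pr
    rw [hpA] at hA
    simp only [Option.map_some, Option.some.injEq] at hA
    cases hpS : skelSteps code (2*code.length+2) start_idx with
    | none => rw [hpS] at hS; simp at hS
    | some q =>
      obtain ⟨eS, t⟩ := q
      rw [hpS] at hS
      simp only [Option.map_some, Option.some.injEq] at hS
      obtain ⟨nc0, nm0, hc1, hc2⟩ := skelSteps_headers code _ start_idx eS t hpS
      obtain ⟨Δ, hrun⟩ := nodeSim code (2*code.length+2) start_idx eS t hpS nc0 nm0 hc1 hc2 [] [] 1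
      have hrun1 : runB code (t + 1) [(start_idx, nc0, nm0, ([] : List Int))] (start_idx + 2) [] =
          some (eS, Δ) := by
        rw [Nat.add_comm t 1, hrun]
        simp [runB]
      unfold store_node_info store_node_info_alt
      rw [hpA, hc1, hc2]
      dsimp only
      rw [hpS]
      dsimp only
      rw [hrun1]
      dsimp only
      rw [hA, hS]
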